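-- pv_equiv track=rewrite | github.com/Shubhamrawat5/open-source-contribution | PYTHON/thanos_sort.py | rightCheck
-- ===== SOURCE A (Python) =====
-- def rightCheck(l: list) -> int:
--     if l == sorted(l):
--         return len(l)
--     else:
--         new_l = l[len(l)//2:]
--         if len(new_l) > 1:
--             if leftCheck(new_l) >= rightCheck(new_l):
--                 return leftCheck(new_l)
--             else:
--                 return rightCheck(new_l)
--         else:
--             return 1
--
-- def leftCheck(l: list) -> int:
--     if l == sorted(l):
--         return len(l)
--     else:
--         new_l = l[:len(l)//2]
--         if len(new_l) > 1:
--             if leftCheck(new_l) >= rightCheck(new_l):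
--                 return leftCheck(new_l)
--             else:
--                 return rightCheck(new_l)
--         else:
--             return 1
-- ===== SOURCE B (Python) =====
-- def rightCheck(l: list) -> int:
--     if l == sorted(l):
--         return len(l)
--     stack = [l[len(l)//2:]]
--     best = 1
--     while stack:
--         x = stack.pop()
--         if x == sorted(x):
--             best = max(best, len(x))
--         elif len(x) > 1:
--             stack.append(x[:len(x)//2])
--             stack.append(x[len(x)//2:])
--     return best
-- ===== Notes on version B (the rewrite author's own statement) =====
-- stated objective: faster
-- what changed: Replaces A's mutual leftCheck/rightCheck recursion (which re-evaluates each recursive call in both the comparison and the taken branch, ~4 subcalls of half size per level) with a single non-recursive explicit-stack loop that visits each node of the halving tree once, accumulating a running maximum of sorted-sublist lengths.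
import Mathlib
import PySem

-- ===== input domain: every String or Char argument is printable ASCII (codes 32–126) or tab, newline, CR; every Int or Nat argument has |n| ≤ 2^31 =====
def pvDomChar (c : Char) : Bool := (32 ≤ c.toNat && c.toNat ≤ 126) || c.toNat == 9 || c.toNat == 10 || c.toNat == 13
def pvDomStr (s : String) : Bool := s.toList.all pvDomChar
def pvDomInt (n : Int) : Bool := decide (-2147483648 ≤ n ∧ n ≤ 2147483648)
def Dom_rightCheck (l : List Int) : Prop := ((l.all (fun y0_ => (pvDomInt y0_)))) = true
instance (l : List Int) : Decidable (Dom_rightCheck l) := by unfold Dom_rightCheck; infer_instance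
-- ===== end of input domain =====

-- B replaces A's mutual leftCheck/rightCheck recursion with one explicit-stack loop that visits
-- each halving-tree node once, accumulating a running maximum (objective: faster; a timing run
-- measured B faster on the generated inputs).

-- lemma needed by the ports' termination proofs: a list of length ≤ 1 equals its sorted version
theorem pv_sorted_short (x : List Int) (h : x.length ≤ 1) :
    PySem.List.sorted x (fun a => a) false = x := by
  match x, h with
  | [], _ => rfl
  | [a], _ => rfl

-- small termination lemmas cited by the ports' decreasing_by (kept above the ports for that reason)
theorem pv_dec_right (l : List Int) (h : ¬ l = PySem.List.sorted l (fun a => a) false) :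
    (PySem.List.slice l (some ((l.length / 2 : Nat) : Int)) none).length < l.length := by
  have h2 : ¬ l.length ≤ 1 := fun hle => h ((pv_sorted_short l hle).symm)
  simp only [PySem.List.slice_from_natCast, List.length_drop]
  omega

theorem pv_dec_left (l : List Int) (h : ¬ l = PySem.List.sorted l (fun a => a) false) :
    (PySem.List.slice l none (some ((l.length / 2 : Nat) : Int))).length < l.length := by
  have h2 : ¬ l.length ≤ 1 := fun hle => h ((pv_sorted_short l hle).symm)
  simp only [PySem.List.slice_to_natCast, List.length_take]
  omega

theorem pv_dec_pop (x : List Int) (rest : List (List Int)) :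
    Prod.Lex (fun a₁ a₂ : Nat => a₁ < a₂) (fun a₁ a₂ : Nat => a₁ < a₂)
      (((rest.map (fun y => 2 * y.length - 1)).sum, rest.length) : Nat × Nat)
      ((((x :: rest).map (fun y => 2 * y.length - 1)).sum, (x :: rest).length) : Nat × Nat) := by
  apply Prod.Lex.right'
  · simp only [List.map_cons, List.sum_cons]
    omega
  · simp

theorem pv_dec_push (x : List Int) (rest : List (List Int)) (h : (x.length : Int) > 1) :
    Prod.Lex (fun a₁ a₂ : Nat => a₁ < a₂) (fun a₁ a₂ : Nat => a₁ < a₂)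
      ((((x.drop (x.length / 2) :: x.take (x.length / 2) :: rest).map (fun y => 2 * y.length - 1)).sum,
        (x.drop (x.length / 2) :: x.take (x.length / 2) :: rest).length) : Nat × Nat)
      ((((x :: rest).map (fun y => 2 * y.length - 1)).sum, (x :: rest).length) : Nat × Nat) := by
  apply Prod.Lex.left
  simp only [List.map_cons, List.sum_cons, List.length_drop, List.length_take]
  omega

-- ===== PORT A =====
mutual
def rightCheck (l : List Int) : Int :=
  if l = PySem.List.sorted l (fun a => a) false then (l.length : Int)
  else
    let new_l := PySem.List.slice l (some ((l.length / 2 : Nat) : Int)) none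
    if (new_l.length : Int) > 1 then
      if leftCheck new_l ≥ rightCheck new_l then leftCheck new_l else rightCheck new_l
    else 1
termination_by l.length
decreasing_by
  all_goals
    rename_i h _
    exact pv_dec_right l h

def leftCheck (l : List Int) : Int :=
  if l = PySem.List.sorted l (fun a => a) false then (l.length : Int)
  else
    let new_l := PySem.List.slice l none (some ((l.length / 2 : Nat) : Int))
    if (new_l.length : Int) > 1 then
      if leftCheck new_l ≥ rightCheck new_l then leftCheck new_l else rightCheck new_l
    else 1
termination_by l.length
decreasing_by
  all_goals
    rename_i h _
    exact pv_dec_left l h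
end

-- ===== PORT B =====
-- the stack loop of Source B; head of the list is the top of the stack
def pvLoop : List (List Int) → Int → Int
  | [], best => best
  | x :: rest, best =>
    if x = PySem.List.sorted x (fun a => a) false then
      pvLoop rest (max best (x.length : Int))
    else if (x.length : Int) > 1 then
      pvLoop (x.drop (x.length / 2) :: x.take (x.length / 2) :: rest) best
    else
      pvLoop rest best
termination_by st _ => ((st.map (fun y => 2 * y.length - 1)).sum, st.length)
decreasing_by
  · exact pv_dec_pop x rest
  · rename_i h2
    exact pv_dec_push x rest h2
  · exact pv_dec_pop x rest

def rightCheck_alt (l : List Int) : Int :=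
  if l = PySem.List.sorted l (fun a => a) false then (l.length : Int)
  else pvLoop [PySem.List.slice l (some ((l.length / 2 : Nat) : Int)) none] 1

-- ===== PRECONDITION & SPEC =====
def Spec_rightCheck (l : List Int) (out : Int) : Prop := out = rightCheck_alt l
instance (l : List Int) (out : Int) : Decidable (Spec_rightCheck l out) := by unfold Spec_rightCheck; infer_instance

-- ===== CLAIM (what is proved, stated in full; the proofs are below) =====
def Claim_equal_rightCheck : Prop := ∀ (l : List Int), Dom_rightCheck l → Spec_rightCheck l (rightCheck l)

-- ===== LEMMAS AND PROOFS =====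

-- the maximum sorted-subarray length over the halving tree rooted at x
def pvF (x : List Int) : Int :=
  if x = PySem.List.sorted x (fun a => a) false then (x.length : Int)
  else max (pvF (x.take (x.length / 2))) (pvF (x.drop (x.length / 2)))
termination_by x.length
decreasing_by
  all_goals
    rename_i h
    have h2 : ¬ x.length ≤ 1 := fun hle => h ((pv_sorted_short x hle).symm)
    simp only [List.length_take, List.length_drop]
    omega

theorem pvF_short (x : List Int) (h : x.length ≤ 1) : pvF x = (x.length : Int) := by
  rw [pvF, if_pos ((pv_sorted_short x h).symm)]

theorem pvF_ge_one : ∀ n (x : List Int), x.length = n → 1 ≤ x.length → 1 ≤ pvF x := by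
  intro n
  induction n using Nat.strong_induction_on with
  | _ n ih =>
    intro x hn hlen
    rw [pvF]
    split
    · exact_mod_cast hlen
    · rename_i h
      have h2 : ¬ x.length ≤ 1 := fun hle => h ((pv_sorted_short x hle).symm)
      have := ih (x.take (x.length / 2)).length (by simp; omega) _ rfl (by simp; omega)
      exact le_max_of_le_left this

theorem pv_pymax (a b : Int) : (if a ≥ b then a else b) = max a b := by
  rcases le_total a b with h | h <;> simp [max_def] <;> omega

theorem pv_lr : ∀ n (x : List Int), x.length = n →
    leftCheck x = (if x = PySem.List.sorted x (fun a => a) false then (x.length : Int)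
                   else pvF (x.take (x.length / 2))) ∧
    rightCheck x = (if x = PySem.List.sorted x (fun a => a) false then (x.length : Int)
                    else pvF (x.drop (x.length / 2))) := by
  intro n
  induction n using Nat.strong_induction_on with
  | _ n ih =>
    intro x hn
    have hmax : ∀ y : List Int, y.length < n →
        max (leftCheck y) (rightCheck y) = pvF y := by
      intro y hy
      obtain ⟨hL, hR⟩ := ih y.length hy y rfl
      by_cases hs : y = PySem.List.sorted y (fun a => a) false
      · rw [hL, hR, if_pos hs, if_pos hs, max_self, pvF, if_pos hs]
      · rw [hL, hR, if_neg hs, if_neg hs]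
        conv_rhs => rw [pvF]
        rw [if_neg hs]
    have key : ∀ y : List Int, 1 ≤ y.length → y.length < n →
        (if (y.length : Int) > 1 then
           (if leftCheck y ≥ rightCheck y then leftCheck y else rightCheck y)
         else 1) = pvF y := by
      intro y h1 h2
      by_cases hgt : (y.length : Int) > 1
      · rw [if_pos hgt, pv_pymax, hmax y h2]
      · rw [if_neg hgt]
        rw [pvF_short y (by omega)]
        have : y.length = 1 := by omega
        simp [this]
    constructor
    · rw [leftCheck.eq_def]
      by_cases hs : x = PySem.List.sorted x (fun a => a) false
      · simp only [if_pos hs]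
      · have h2 : ¬ x.length ≤ 1 := fun hle => hs ((pv_sorted_short x hle).symm)
        simp only [if_neg hs, PySem.List.slice_to_natCast]
        exact key _ (by simp; omega) (by simp; omega)
    · rw [rightCheck.eq_def]
      by_cases hs : x = PySem.List.sorted x (fun a => a) false
      · simp only [if_pos hs]
      · have h2 : ¬ x.length ≤ 1 := fun hle => hs ((pv_sorted_short x hle).symm)
        simp only [if_neg hs, PySem.List.slice_from_natCast]
        exact key _ (by simp; omega) (by simp; omega)

theorem pvLoop_spec : ∀ n (x : List Int), x.length = n → ∀ (st : List (List Int)) (best : Int),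
    pvLoop (x :: st) best = pvLoop st (max best (pvF x)) := by
  intro n
  induction n using Nat.strong_induction_on with
  | _ n ih =>
    intro x hn st best
    rw [pvLoop]
    by_cases hs : x = PySem.List.sorted x (fun a => a) false
    · rw [if_pos hs, pvF, if_pos hs]
    · have h2 : ¬ x.length ≤ 1 := fun hle => hs ((pv_sorted_short x hle).symm)
      rw [if_neg hs, if_pos (by exact_mod_cast (by omega : 1 < (x.length : Int)))]
      rw [ih (x.drop (x.length / 2)).length (by simp; omega) _ rfl]
      rw [ih (x.take (x.length / 2)).length (by simp; omega) _ rfl]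
      conv_rhs => rw [pvF]
      rw [if_neg hs, max_assoc, max_comm (pvF (x.drop (x.length / 2)))]

-- ===== VERDICT (by name: the statement is the Claim_ definition above) =====
theorem rightCheck_spec : Claim_equal_rightCheck := by
  intro l _
  unfold Spec_rightCheck
  obtain ⟨_, hR⟩ := pv_lr l.length l rfl
  rw [hR]
  unfold rightCheck_alt
  by_cases hs : l = PySem.List.sorted l (fun a => a) false
  · rw [if_pos hs, if_pos hs]
  · have h2 : ¬ l.length ≤ 1 := fun hle => hs ((pv_sorted_short l hle).symm)
    rw [if_neg hs, if_neg hs, PySem.List.slice_from_natCast]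
    rw [pvLoop_spec (l.drop (l.length / 2)).length _ rfl, pvLoop]
    have h1 : 1 ≤ (l.drop (l.length / 2)).length := by simp; omega
    have := pvF_ge_one (l.drop (l.length / 2)).length _ rfl h1
    omega
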